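-- pv_equiv track=rewrite | github.com/LOLA0786/PrivateVault-AI-Agent-Architecture | tests/multi_agent_coordination_attack_test.py | detect_coordination_violation
-- ===== SOURCE A (Python) =====
-- def detect_coordination_violation(action_log):
--     read_seen = False
--     export_seen = False
--
--     for a in action_log:
--         if a["action"] == "read_customer_data":
--             read_seen = True
--         if a["action"] == "export_summary":
--             export_seen = True
--
--     if read_seen and export_seen:
--         return True
--
--     return False
-- ===== SOURCE B (Python) =====
-- def detect_coordination_violation(action_log):
--     def seen(target):
--         return any(a["action"] == target for a in action_log)
--     return seen("read_customer_data") and seen("export_summary")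
-- ===== Notes on version B (the rewrite author's own statement) =====
-- stated objective: idiomatic
-- what changed: Replaces A's single loop threading two boolean flags with two staged short-circuiting any() searches, one per target action, combined with and.
import Mathlib
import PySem

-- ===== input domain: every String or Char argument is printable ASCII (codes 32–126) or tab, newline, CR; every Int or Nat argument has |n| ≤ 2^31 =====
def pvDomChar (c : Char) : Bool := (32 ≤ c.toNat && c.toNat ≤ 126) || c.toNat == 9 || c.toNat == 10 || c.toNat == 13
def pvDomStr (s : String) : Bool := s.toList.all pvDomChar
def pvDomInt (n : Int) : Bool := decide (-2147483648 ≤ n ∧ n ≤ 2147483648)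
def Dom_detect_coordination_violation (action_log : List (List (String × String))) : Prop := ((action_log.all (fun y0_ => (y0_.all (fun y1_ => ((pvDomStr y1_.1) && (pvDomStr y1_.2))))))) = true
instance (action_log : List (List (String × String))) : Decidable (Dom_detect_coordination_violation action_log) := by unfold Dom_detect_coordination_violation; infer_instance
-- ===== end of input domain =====

-- B replaces A's single flag-threading loop with two staged short-circuiting any() searches combined with `and` (idiomatic, same cost).


-- ===== PORT A =====
-- a["action"] is ported as (Dict.mk a).get? "action"; Pre_ below excludes the KeyError case.
def detect_coordination_violation (action_log : List (List (String × String))) : Bool :=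
  let st := action_log.foldl
    (fun (st : Bool × Bool) a =>
      let act := (PySem.Dict.mk a).get? "action"
      let read_seen := if act = some "read_customer_data" then true else st.1
      let export_seen := if act = some "export_summary" then true else st.2
      (read_seen, export_seen))
    (false, false)
  if st.1 && st.2 then true else false

-- ===== PORT B =====
-- seen(target) = any(a["action"] == target for a in action_log); List.any short-circuits like Python's any.
def pvSeen (action_log : List (List (String × String))) (target : String) : Bool :=
  action_log.any (fun a => (PySem.Dict.mk a).get? "action" == some target)

def detect_coordination_violation_alt (action_log : List (List (String × String))) : Bool :=
  pvSeen action_log "read_customer_data" && pvSeen action_log "export_summary"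

-- ===== PRECONDITION & SPEC =====
-- Pre_ excludes entries without an "action" key, on which the Python A raises KeyError.
def Pre_detect_coordination_violation (action_log : List (List (String × String))) : Prop :=
  (action_log.all (fun a => (PySem.Dict.mk a).contains "action")) = true
instance (action_log : List (List (String × String))) : Decidable (Pre_detect_coordination_violation action_log) := by unfold Pre_detect_coordination_violation; infer_instance
def pvWitness_detect_coordination_violation : (List (List (String × String))) :=
  [[("action", "read_customer_data")], [("action", "export_summary")]]

def Spec_detect_coordination_violation (action_log : List (List (String × String))) (out : Bool) : Prop := out = detect_coordination_violation_alt action_log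
instance (action_log : List (List (String × String))) (out : Bool) : Decidable (Spec_detect_coordination_violation action_log out) := by unfold Spec_detect_coordination_violation; infer_instance

-- ===== CLAIM (what is proved, stated in full; the proofs are below) =====
def Claim_equal_detect_coordination_violation : Prop := ∀ (action_log : List (List (String × String))), Dom_detect_coordination_violation action_log → Pre_detect_coordination_violation action_log → Spec_detect_coordination_violation action_log (detect_coordination_violation action_log)

-- ===== LEMMAS AND PROOFS =====

-- A's fold accumulates exactly "have we seen each flag so far".
theorem foldA_char (l : List (List (String × String))) (r e : Bool) :
    l.foldl
      (fun (st : Bool × Bool) a =>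
        let act := (PySem.Dict.mk a).get? "action"
        let read_seen := if act = some "read_customer_data" then true else st.1
        let export_seen := if act = some "export_summary" then true else st.2
        (read_seen, export_seen))
      (r, e)
    = (r || pvSeen l "read_customer_data", e || pvSeen l "export_summary") := by
  induction l generalizing r e with
  | nil => simp [pvSeen]
  | cons a t ih =>
    simp only [List.foldl_cons, ih, pvSeen, List.any_cons]
    refine Prod.ext ?_ ?_ <;> simp only [] <;> split_ifs with h <;>
      simp [h, beq_eq_decide]

theorem detect_coordination_violation_spec' (action_log : List (List (String × String))) :
    detect_coordination_violation action_log = detect_coordination_violation_alt action_log := by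
  unfold detect_coordination_violation detect_coordination_violation_alt
  rw [foldA_char]
  simp

-- ===== VERDICT (by name: the statement is the Claim_ definition above) =====
theorem detect_coordination_violation_spec : Claim_equal_detect_coordination_violation := by
  intro action_log _ _
  exact detect_coordination_violation_spec' action_log
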